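-- pv_equiv track=rewrite | github.com/alphamikle/proofline | proofline/config.py | top_level_blocks
-- ===== SOURCE A (Python) =====
-- from typing import Any, Dict, List, Tuple
--
-- def top_level_blocks(text: str) -> List[Tuple[str, str]]:
--     lines = text.splitlines(keepends=True)
--     starts: List[Tuple[str, int]] = []
--     for i, line in enumerate(lines):
--         if not line.strip() or line.startswith("#") or line[0].isspace():
--             continue
--         if ":" not in line:
--             continue
--         key = line.split(":", 1)[0].strip()
--         if key:
--             starts.append((key, i))
--     blocks: List[Tuple[str, str]] = []
--     for idx, (key, start) in enumerate(starts):
--         end = starts[idx + 1][1] if idx + 1 < len(starts) else len(lines)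
--         blocks.append((key, "".join(lines[start:end]).rstrip() + "\n"))
--     return blocks
-- ===== SOURCE B (Python) =====
-- from typing import List, Optional, Tuple
--
-- def _key_of(line: str) -> Optional[str]:
--     if not line.strip() or line.startswith("#") or line[0].isspace() or ":" not in line:
--         return None
--     key = line.split(":", 1)[0].strip()
--     return key or None
--
-- def top_level_blocks(text: str) -> List[Tuple[str, str]]:
--     blocks: List[Tuple[str, str]] = []
--     current: Optional[Tuple[str, List[str]]] = None
--     for line in text.splitlines(keepends=True):
--         key = _key_of(line)
--         if key is not None:
--             if current is not None:
--                 blocks.append((current[0], "".join(current[1]).rstrip() + "\n"))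
--             current = (key, [line])
--         elif current is not None:
--             current[1].append(line)
--     if current is not None:
--         blocks.append((current[0], "".join(current[1]).rstrip() + "\n"))
--     return blocks
-- ===== Notes on version B (the rewrite author's own statement) =====
-- stated objective: simpler
-- what changed: Replaces A's two-pass scheme (collect a list of (key, start-index) pairs, then re-slice the lines list between consecutive start indices) with a single pass that keeps the current key and an accumulating buffer of lines, flushing the buffer whenever a new top-level key line appears and once at the end.
import Mathlib
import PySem

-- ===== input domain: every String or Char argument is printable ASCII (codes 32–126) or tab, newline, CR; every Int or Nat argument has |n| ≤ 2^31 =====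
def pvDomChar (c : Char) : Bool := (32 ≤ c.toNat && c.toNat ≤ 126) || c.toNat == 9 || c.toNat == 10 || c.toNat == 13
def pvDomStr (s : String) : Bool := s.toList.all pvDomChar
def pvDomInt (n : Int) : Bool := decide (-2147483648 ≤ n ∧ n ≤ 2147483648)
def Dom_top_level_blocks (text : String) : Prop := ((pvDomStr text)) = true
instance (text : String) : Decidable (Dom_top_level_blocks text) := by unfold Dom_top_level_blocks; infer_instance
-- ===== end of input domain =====

-- B replaces A's two passes (collect (key, start-index) pairs, then slice the lines list between
-- consecutive indices) by a single pass keeping the current key and a line buffer; equal returns proved on Dom.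

-- ===== shared helpers: ports of expressions both Pythons contain =====

-- hand port of text.splitlines(keepends=True): exact on Dom, where the only line
-- boundaries are '\n', '\r' and '\r\n' (Python's extra boundary chars lie outside Dom)
def pvSplitKeep (acc : List Char) : List Char → List (List Char)
  | [] => if acc.isEmpty then [] else [acc.reverse]
  | c :: rest =>
    if c = '\n' then (acc.reverse ++ ['\n']) :: pvSplitKeep [] rest
    else if c = '\r' then
      match rest with
      | d :: rest' =>
        if d = '\n' then (acc.reverse ++ ['\r', '\n']) :: pvSplitKeep [] rest'
        else (acc.reverse ++ ['\r']) :: pvSplitKeep [] (d :: rest')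
      | [] => (acc.reverse ++ ['\r']) :: pvSplitKeep [] []
    else pvSplitKeep (c :: acc) rest

-- line.split(":", 1)[0].strip() — exact: for the one-char separator, piece [0] is the part before the first ':'
def pvKeyRaw (line : List Char) : List Char :=
  PySem.Chars.strip (line.takeWhile (fun c => c != ':'))

-- the top-level-key test both Pythons apply to a line (line[0] is only read when strip is nonempty, so line ≠ [])
def pvIsKey (line : List Char) : Bool :=
  !(PySem.Chars.strip line).isEmpty &&
  !(PySem.Chars.startswith line ['#']) &&
  !(PySem.Chars.isspace (line.headD ' ')) &&
  PySem.Chars.isIn [':'] line &&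
  !(pvKeyRaw line).isEmpty

-- "".join(buf).rstrip() + "\n"
def pvRender (buf : List (List Char)) : String :=
  String.ofList (PySem.Chars.rstrip (PySem.Chars.join [] buf) ++ ['\n'])

-- ===== PORT A =====
-- body of A's second loop: end = starts[idx+1][1] if idx+1 < len(starts) else len(lines); slice, join, rstrip
def pvStepA (lines : List (List Char)) (starts : List (List Char × Int))
    (bs : List (String × String)) (ie : Int × (List Char × Int)) : List (String × String) :=
  let endIdx : Int :=
    match PySem.List.pyGet? starts (ie.1 + 1) with
    | some q => q.2
    | none => (lines.length : Int)
  bs ++ [(String.ofList ie.2.1, pvRender (PySem.List.slice lines (some ie.2.2) (some endIdx)))]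

def top_level_blocks (text : String) : List (String × String) :=
  let lines := pvSplitKeep [] text.toList
  let starts : List (List Char × Int) :=
    (PySem.List.enumerate lines 0).foldl
      (fun st il => if pvIsKey il.2 then st ++ [(pvKeyRaw il.2, il.1)] else st) []
  (PySem.List.enumerate starts 0).foldl (pvStepA lines starts) []

-- ===== PORT B =====
-- _key_of(line): the key, or None when the line is not a top-level key line
def pvKeyOf? (line : List Char) : Option (List Char) :=
  if pvIsKey line then some (pvKeyRaw line) else none

-- blocks.append((current[0], "".join(current[1]).rstrip() + "\n")) when a block is open
def pvFlushOpt (cur : Option (List Char × List (List Char))) : List (String × String) :=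
  match cur with
  | some c => [(String.ofList c.1, pvRender c.2)]
  | none => []

def pvFlush (st : List (String × String) × Option (List Char × List (List Char))) :
    List (String × String) :=
  st.1 ++ pvFlushOpt st.2

-- one iteration of B's single pass
def pvStepB (st : List (String × String) × Option (List Char × List (List Char)))
    (line : List Char) : List (String × String) × Option (List Char × List (List Char)) :=
  match pvKeyOf? line with
  | some k => (pvFlush st, some (k, [line]))
  | none =>
    match st.2 with
    | some cur => (st.1, some (cur.1, cur.2 ++ [line]))
    | none => st

def top_level_blocks_alt (text : String) : List (String × String) :=
  pvFlush ((pvSplitKeep [] text.toList).foldl pvStepB ([], none))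

-- ===== PRECONDITION & SPEC =====
def Spec_top_level_blocks (text : String) (out : List (String × String)) : Prop := out = top_level_blocks_alt text
instance (text : String) (out : List (String × String)) : Decidable (Spec_top_level_blocks text out) := by unfold Spec_top_level_blocks; infer_instance

-- ===== CLAIM (what is proved, stated in full; the proofs are below) =====
def Claim_equal_top_level_blocks : Prop := ∀ (text : String), Dom_top_level_blocks text → Spec_top_level_blocks text (top_level_blocks text)

-- ===== LEMMAS AND PROOFS =====

-- the common recursive specification: one block per key line, holding that line and the non-key lines after it
def specBlocks : List (List Char) → List (String × String)
  | [] => []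
  | l :: ls =>
    if pvIsKey l then
      (String.ofList (pvKeyRaw l), pvRender (l :: ls.takeWhile (fun x => !pvIsKey x))) :: specBlocks ls
    else specBlocks ls

-- ---- B side ----

theorem pvStepB_key (st : List (String × String) × Option (List Char × List (List Char)))
    (line : List Char) (hp : pvIsKey line = true) :
    pvStepB st line = (pvFlush st, some (pvKeyRaw line, [line])) := by
  simp [pvStepB, pvKeyOf?, hp]

theorem pvStepB_nonkey_some (acc : List (String × String)) (cur : List Char × List (List Char))
    (line : List Char) (hp : pvIsKey line = false) :
    pvStepB (acc, some cur) line = (acc, some (cur.1, cur.2 ++ [line])) := by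
  simp [pvStepB, pvKeyOf?, hp]

theorem pvStepB_nonkey_none (acc : List (String × String)) (line : List Char)
    (hp : pvIsKey line = false) :
    pvStepB (acc, none) line = (acc, none) := by
  simp [pvStepB, pvKeyOf?, hp]

theorem foldB_shift (ls : List (List Char)) (acc : List (String × String))
    (cur : Option (List Char × List (List Char))) :
    ls.foldl pvStepB (acc, cur) =
      (acc ++ (ls.foldl pvStepB ([], cur)).1, (ls.foldl pvStepB ([], cur)).2) := by
  induction ls generalizing acc cur with
  | nil => simp
  | cons l ls ih =>
    by_cases hp : pvIsKey l
    · simp only [List.foldl_cons, pvStepB_key _ _ hp, pvFlush]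
      rw [ih, ih (([] : List (String × String)) ++ pvFlushOpt cur)]
      simp
    · rw [Bool.not_eq_true] at hp
      cases cur with
      | none =>
        simp only [List.foldl_cons, pvStepB_nonkey_none _ _ hp]
        exact ih acc none
      | some c =>
        simp only [List.foldl_cons, pvStepB_nonkey_some _ _ _ hp]
        exact ih acc (some (c.1, c.2 ++ [l]))

theorem flushB_shift (ls : List (List Char)) (acc : List (String × String))
    (cur : Option (List Char × List (List Char))) :
    pvFlush (ls.foldl pvStepB (acc, cur)) = acc ++ pvFlush (ls.foldl pvStepB ([], cur)) := by
  rw [foldB_shift]; simp [pvFlush]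

theorem foldB_some (ls : List (List Char)) (k : List Char) (buf : List (List Char)) :
    pvFlush (ls.foldl pvStepB ([], some (k, buf))) =
      (String.ofList k, pvRender (buf ++ ls.takeWhile (fun x => !pvIsKey x))) ::
        pvFlush (ls.foldl pvStepB ([], none)) := by
  induction ls generalizing buf with
  | nil => simp [pvFlush, pvFlushOpt]
  | cons l ls ih =>
    by_cases hp : pvIsKey l
    · simp only [List.foldl_cons, pvStepB_key _ _ hp]
      rw [show pvFlush (([] : List (String × String)), some (k, buf)) =
            [(String.ofList k, pvRender buf)] from rfl]
      rw [flushB_shift]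
      simp [pvFlush, pvFlushOpt, List.takeWhile_cons, hp]
    · rw [Bool.not_eq_true] at hp
      simp only [List.foldl_cons, pvStepB_nonkey_some _ _ _ hp, pvStepB_nonkey_none _ _ hp]
      rw [ih]
      simp [List.takeWhile_cons, hp]

theorem foldB_none (ls : List (List Char)) :
    pvFlush (ls.foldl pvStepB ([], none)) = specBlocks ls := by
  induction ls with
  | nil => simp [pvFlush, pvFlushOpt, specBlocks]
  | cons l ls ih =>
    by_cases hp : pvIsKey l
    · simp only [List.foldl_cons, pvStepB_key _ _ hp]
      rw [show pvFlush (([] : List (String × String)), none) = [] from rfl]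
      rw [foldB_some, ih]
      simp [specBlocks, hp]
    · rw [Bool.not_eq_true] at hp
      simp only [List.foldl_cons, pvStepB_nonkey_none _ _ hp, ih, specBlocks, hp]
      simp

-- ---- A side ----

def startsF (n : Int) : List (List Char) → List (List Char × Int)
  | [] => []
  | l :: ls => if pvIsKey l then (pvKeyRaw l, n) :: startsF (n + 1) ls else startsF (n + 1) ls

def endOfA (lines : List (List Char)) (rest : List (List Char × Int)) : Int :=
  match rest with
  | [] => (lines.length : Int)
  | q :: _ => q.2

def blocksOf (lines : List (List Char)) : List (List Char × Int) → List (String × String)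
  | [] => []
  | e :: rest =>
    (String.ofList e.1, pvRender (PySem.List.slice lines (some e.2) (some (endOfA lines rest)))) ::
      blocksOf lines rest

theorem startsA (ls : List (List Char)) (n : Int) (acc : List (List Char × Int)) :
    (PySem.List.enumerate ls n).foldl
      (fun st il => if pvIsKey il.2 then st ++ [(pvKeyRaw il.2, il.1)] else st) acc =
      acc ++ startsF n ls := by
  induction ls generalizing n acc with
  | nil => simp [PySem.List.enumerate, startsF]
  | cons l ls ih =>
    rw [PySem.List.enumerate_cons]
    by_cases hp : pvIsKey l
    · simp only [List.foldl_cons, hp, if_pos, startsF]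
      rw [ih]
      simp [hp]
    · simp only [List.foldl_cons, hp, if_neg, startsF]
      rw [ih]
      simp [hp]

theorem blocksA (lines : List (List Char)) (starts done rest : List (List Char × Int))
    (acc : List (String × String)) (h : starts = done ++ rest) :
    (PySem.List.enumerate rest (done.length : Int)).foldl (pvStepA lines starts) acc =
      acc ++ blocksOf lines rest := by
  induction rest generalizing done acc with
  | nil => simp [PySem.List.enumerate, blocksOf]
  | cons e rest ih =>
    rw [PySem.List.enumerate_cons, List.foldl_cons]
    have hget : PySem.List.pyGet? starts ((done.length : Int) + 1) = rest.head? := by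
      have : ((done.length : Int) + 1) = ((done.length + 1 : Nat) : Int) := by push_cast; ring
      rw [this, PySem.List.pyGet?_natCast, h]
      rw [List.getElem?_append_right (by omega)]
      have : done.length + 1 - done.length = 1 := by omega
      rw [this]
      cases rest <;> simp
    have hstep : pvStepA lines starts acc ((done.length : Int), e) =
        acc ++ [(String.ofList e.1,
          pvRender (PySem.List.slice lines (some e.2) (some (endOfA lines rest))))] := by
      simp only [pvStepA, hget]
      cases rest with
      | nil => simp [endOfA]
      | cons q r => simp [endOfA]
    rw [hstep]
    have hcast : (done.length : Int) + 1 = ((done ++ [e]).length : Int) := by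
      push_cast [List.length_append, List.length_cons, List.length_nil]; ring
    rw [hcast, ih (done ++ [e]) _ (by simp [h])]
    simp [blocksOf]

theorem startsF_shift (ls : List (List Char)) (n : Int) :
    startsF (n + 1) ls = (startsF n ls).map (fun e => (e.1, e.2 + 1)) := by
  induction ls generalizing n with
  | nil => simp [startsF]
  | cons l ls ih =>
    by_cases hp : pvIsKey l <;> simp [startsF, hp, ih (n + 1)]

theorem startsF_nonneg (ls : List (List Char)) (n : Int) (e : List Char × Int)
    (h : e ∈ startsF n ls) : n ≤ e.2 := by
  induction ls generalizing n with
  | nil => simp [startsF] at h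
  | cons l ls ih =>
    by_cases hp : pvIsKey l
    · simp only [startsF, hp, if_pos, List.mem_cons] at h
      rcases h with h | h
      · simp [h]
      · have := ih (n + 1) h; omega
    · have h' : e ∈ startsF (n + 1) ls := by
        simpa [startsF, hp] using h
      have := ih (n + 1) h'; omega

theorem startsF_head (ls : List (List Char)) (n : Int) (k : List Char) (i : Int)
    (rest : List (List Char × Int)) (h : startsF n ls = (k, i) :: rest) :
    i = n + ((ls.takeWhile (fun x => !pvIsKey x)).length : Int) := by
  induction ls generalizing n with
  | nil => simp [startsF] at h
  | cons l ls ih =>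
    by_cases hp : pvIsKey l
    · simp only [startsF, hp, if_pos, List.cons_eq_cons, Prod.mk.injEq] at h
      have hi : i = n := h.1.2.symm
      simp [List.takeWhile_cons, hp, hi]
    · have h' : startsF (n + 1) ls = (k, i) :: rest := by
        simpa [startsF, hp] using h
      rw [Bool.not_eq_true] at hp
      have := ih (n + 1) h'
      simp only [List.takeWhile_cons, hp, Bool.not_false, if_pos, List.length_cons]
      push_cast
      omega

theorem startsF_nil_all (ls : List (List Char)) (n : Int) (h : startsF n ls = []) :
    ls.takeWhile (fun x => !pvIsKey x) = ls := by
  induction ls generalizing n with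
  | nil => simp
  | cons l ls ih =>
    by_cases hp : pvIsKey l
    · simp [startsF, hp] at h
    · have h' : startsF (n + 1) ls = [] := by
        simpa [startsF, hp] using h
      rw [Bool.not_eq_true] at hp
      simp [hp, ih (n + 1) h']

theorem slice_cons_shift {α : Type} (x : α) (xs : List α) (a b : Int) (ha : 0 ≤ a) (hb : 0 ≤ b) :
    PySem.List.slice (x :: xs) (some (a + 1)) (some (b + 1)) = PySem.List.slice xs (some a) (some b) := by
  rw [PySem.List.slice_toNat (x :: xs) (by omega) (by omega), PySem.List.slice_toNat xs ha hb]
  have h1 : (a + 1).toNat = a.toNat + 1 := by omega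
  rw [h1]
  have h2 : (b + 1).toNat - (a.toNat + 1) = b.toNat - a.toNat := by omega
  rw [h2, List.drop_succ_cons]

theorem blocksOf_shift (st : List (List Char × Int)) (l : List Char) (lines : List (List Char))
    (h : ∀ e ∈ st, 0 ≤ e.2) :
    blocksOf (l :: lines) (st.map (fun e => (e.1, e.2 + 1))) = blocksOf lines st := by
  induction st with
  | nil => simp [blocksOf]
  | cons e st ih =>
    have he : 0 ≤ e.2 := h e (by simp)
    have hend : endOfA (l :: lines) (st.map (fun e => (e.1, e.2 + 1))) = endOfA lines st + 1 := by
      cases st with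
      | nil => simp only [List.map_nil, endOfA, List.length_cons]; push_cast; ring
      | cons q st' => simp [endOfA]
    have hend0 : 0 ≤ endOfA lines st := by
      cases st with
      | nil => simp only [endOfA]; omega
      | cons q st' => exact h q (by simp)
    simp only [List.map_cons, blocksOf, hend]
    rw [slice_cons_shift _ _ _ _ he hend0, ih (fun e he' => h e (by simp [he']))]

theorem blocksMain (lines : List (List Char)) :
    blocksOf lines (startsF 0 lines) = specBlocks lines := by
  induction lines with
  | nil => simp [startsF, blocksOf, specBlocks]
  | cons l ls ih =>
    by_cases hp : pvIsKey l
    · simp only [startsF, hp, if_pos]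
      rw [show (0 : Int) + 1 = 1 from rfl, show (1 : Int) = 0 + 1 from rfl, startsF_shift]
      simp only [blocksOf]
      have htail : blocksOf (l :: ls) ((startsF 0 ls).map (fun e => (e.1, e.2 + 1))) =
          specBlocks ls := by
        rw [blocksOf_shift _ _ _ (fun e he => startsF_nonneg ls 0 e he), ih]
      rw [htail]
      have hhead : PySem.List.slice (l :: ls)
            (some 0) (some (endOfA (l :: ls) ((startsF 0 ls).map (fun e => (e.1, e.2 + 1))))) =
          l :: ls.takeWhile (fun x => !pvIsKey x) := by
        cases h0 : startsF 0 ls with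
        | nil =>
          simp only [List.map_nil, endOfA]
          rw [PySem.List.slice_toNat (l :: ls) (by omega) (by omega)]
          simp [startsF_nil_all ls 0 h0]
        | cons q r =>
          have hq : q.2 = ((ls.takeWhile (fun x => !pvIsKey x)).length : Int) := by
            have := startsF_head ls 0 q.1 q.2 r (by rw [h0])
            omega
          have hq0 : 0 ≤ q.2 := startsF_nonneg ls 0 q (by simp [h0])
          simp only [List.map_cons, endOfA]
          rw [PySem.List.slice_toNat (l :: ls) (by omega) (by omega)]
          have h1 : (q.2 + 1).toNat = (ls.takeWhile (fun x => !pvIsKey x)).length + 1 := by omega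
          simp only [Int.toNat_zero, List.drop_zero, Nat.sub_zero, h1]
          rw [List.take_succ_cons]
          congr 1
          have hpre : ls.takeWhile (fun x => !pvIsKey x) <+: ls := List.takeWhile_prefix _
          exact ((List.prefix_iff_eq_take.mp hpre).symm)
      rw [hhead]
      simp [specBlocks, hp]
    · have hs : startsF 0 (l :: ls) = startsF (0 + 1) ls := by
        simp [startsF, hp]
      rw [Bool.not_eq_true] at hp
      rw [hs, startsF_shift]
      rw [blocksOf_shift _ _ _ (fun e he => startsF_nonneg ls 0 e he), ih]
      simp [specBlocks, hp]

theorem blocksA0 (lines : List (List Char)) (starts : List (List Char × Int)) :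
    (PySem.List.enumerate starts 0).foldl (pvStepA lines starts) [] = blocksOf lines starts := by
  have := blocksA lines starts [] starts [] rfl
  simpa using this

-- ===== VERDICT (by name: the statement is the Claim_ definition above) =====
theorem top_level_blocks_spec : Claim_equal_top_level_blocks := by
  intro text _
  unfold Spec_top_level_blocks top_level_blocks top_level_blocks_alt
  dsimp only
  rw [startsA _ 0 [], List.nil_append, blocksA0, blocksMain, foldB_none]
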